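-- pv_equiv track=rewrite | github.com/Matiashonkasalo/Hotel_Review-Classifier | src/PROJECT2_NL.py | compare_test_results_1
-- ===== SOURCE A (Python) =====
-- def compare_test_results_1(y_pred, y_test, test_indices, raw_sentences):
--     errors = {0: [], 1: [], 2: [], 3: []}
--
--     for i in range(len(y_pred)):
--         if y_pred[i] != y_test[i]:
--             true_label = y_test[i]
--             sent = raw_sentences[test_indices[i]]
--             errors[true_label].append((sent, y_pred[i]))
--
--     return errors
-- ===== SOURCE B (Python) =====
-- def compare_test_results_1(y_pred, y_test, test_indices, raw_sentences):
--     return {label: [(raw_sentences[idx], p)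
--                     for p, t, idx in zip(y_pred, y_test, test_indices)
--                     if t == label and p != t]
--             for label in range(4)}
-- ===== Notes on version B (the rewrite author's own statement) =====
-- stated objective: idiomatic
-- what changed: Replaces the single index-driven dispatch loop that appends into a pre-built mutable dict with a dict comprehension over the four fixed labels, each bucket built by its own comprehension over zip(y_pred, y_test, test_indices); indexing into y_pred/y_test/test_indices disappears in favour of zip truncation.
import Mathlib
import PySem

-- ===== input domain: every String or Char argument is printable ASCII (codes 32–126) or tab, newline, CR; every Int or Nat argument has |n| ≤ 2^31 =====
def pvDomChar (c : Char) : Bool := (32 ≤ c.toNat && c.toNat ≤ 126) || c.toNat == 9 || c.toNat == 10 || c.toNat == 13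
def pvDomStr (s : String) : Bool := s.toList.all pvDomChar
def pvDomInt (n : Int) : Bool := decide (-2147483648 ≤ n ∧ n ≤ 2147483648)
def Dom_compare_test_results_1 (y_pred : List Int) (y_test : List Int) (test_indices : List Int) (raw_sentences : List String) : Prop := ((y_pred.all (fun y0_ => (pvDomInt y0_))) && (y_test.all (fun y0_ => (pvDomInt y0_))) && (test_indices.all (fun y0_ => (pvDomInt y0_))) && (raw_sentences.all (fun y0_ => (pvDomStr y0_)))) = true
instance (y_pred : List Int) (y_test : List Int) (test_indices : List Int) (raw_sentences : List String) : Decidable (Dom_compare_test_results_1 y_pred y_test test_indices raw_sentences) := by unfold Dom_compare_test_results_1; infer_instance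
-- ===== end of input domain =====

-- B replaces A's single dispatch loop appending into a pre-built dict by a per-label map over
-- the four fixed labels, each bucket a filterMap over the zipped triples (objective: idiomatic).


-- ===== PORT A =====
def compare_test_results_1 (y_pred : List Int) (y_test : List Int) (test_indices : List Int) (raw_sentences : List String) : List (Int × List (String × Int)) :=
  -- errors = {0: [], 1: [], 2: [], 3: []} is the fold's initial dict
  ((PySem.List.pyRange 0 (y_pred.length : Int) 1).foldl
    (fun errors i =>
      if PySem.List.pyGetD y_pred i 0 ≠ PySem.List.pyGetD y_test i 0 then
        errors.modify (PySem.List.pyGetD y_test i 0) []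
          (fun l => l ++ [(PySem.List.pyGetD raw_sentences (PySem.List.pyGetD test_indices i 0) "",
                           PySem.List.pyGetD y_pred i 0)])
      else errors)
    (PySem.Dict.ofList ([(0, []), (1, []), (2, []), (3, [])] : List (Int × List (String × Int))))).items

-- ===== PORT B =====
def compare_test_results_1_alt (y_pred : List Int) (y_test : List Int) (test_indices : List Int) (raw_sentences : List String) : List (Int × List (String × Int)) :=
  (List.range 4).map (fun (label : Nat) =>
    ((label : Int),
      (y_pred.zip (y_test.zip test_indices)).filterMap (fun z =>
        if z.2.1 = (label : Int) ∧ z.1 ≠ z.2.1 then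
          some (PySem.List.pyGetD raw_sentences z.2.2 "", z.1)
        else none)))

-- ===== PRECONDITION & SPEC =====
-- Pre_ is exactly where the Python A returns: it reads y_test[i] for every i < len(y_pred)
-- (IndexError if y_test is shorter), and on a misclassified index i it reads test_indices[i]
-- (IndexError), raw_sentences[test_indices[i]] (IndexError unless in Python range), and
-- errors[y_test[i]] (KeyError unless the true label is one of 0,1,2,3).
def Pre_compare_test_results_1 (y_pred : List Int) (y_test : List Int) (test_indices : List Int) (raw_sentences : List String) : Prop :=
  y_pred.length ≤ y_test.length ∧
  ∀ i, i < y_pred.length → y_pred.getD i 0 ≠ y_test.getD i 0 →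
    i < test_indices.length ∧ y_test.getD i 0 ∈ ([0, 1, 2, 3] : List Int) ∧
      PySem.Raise.InRange raw_sentences.length (test_indices.getD i 0)
instance (y_pred : List Int) (y_test : List Int) (test_indices : List Int) (raw_sentences : List String) : Decidable (Pre_compare_test_results_1 y_pred y_test test_indices raw_sentences) := by unfold Pre_compare_test_results_1; infer_instance

def pvWitness_compare_test_results_1 : List Int × List Int × List Int × List String :=
  ([1, 0], [0, 0], [0, 1], ["a", "b"])

def Spec_compare_test_results_1 (y_pred : List Int) (y_test : List Int) (test_indices : List Int) (raw_sentences : List String) (out : List (Int × List (String × Int))) : Prop := out = compare_test_results_1_alt y_pred y_test test_indices raw_sentences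
instance (y_pred : List Int) (y_test : List Int) (test_indices : List Int) (raw_sentences : List String) (out : List (Int × List (String × Int))) : Decidable (Spec_compare_test_results_1 y_pred y_test test_indices raw_sentences out) := by unfold Spec_compare_test_results_1; infer_instance

-- ===== CLAIM (what is proved, stated in full; the proofs are below) =====
def Claim_equal_compare_test_results_1 : Prop := ∀ (y_pred : List Int) (y_test : List Int) (test_indices : List Int) (raw_sentences : List String), Dom_compare_test_results_1 y_pred y_test test_indices raw_sentences → Pre_compare_test_results_1 y_pred y_test test_indices raw_sentences → Spec_compare_test_results_1 y_pred y_test test_indices raw_sentences (compare_test_results_1 y_pred y_test test_indices raw_sentences)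

-- ===== LEMMAS AND PROOFS =====

-- the misclassified triples, as (true label, (sentence, predicted)) pairs
def selz (rs : List String) (zs : List (Int × Int × Int)) : List (Int × (String × Int)) :=
  (zs.filter (fun z => decide (z.1 ≠ z.2.1))).map
    (fun z => (z.2.1, (PySem.List.pyGetD rs z.2.2 "", z.1)))

theorem pyGetD_cons_succ {α : Type} (x : α) (xs : List α) (dflt : α) (i : Int) (h : 0 ≤ i) :
    PySem.List.pyGetD (x :: xs) (i + 1) dflt = PySem.List.pyGetD xs i dflt := by
  obtain ⟨k, rfl⟩ : ∃ k : Nat, i = (k : Int) := ⟨i.toNat, (Int.toNat_of_nonneg h).symm⟩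
  have h1 : ((k : Int) + 1) = ((k + 1 : Nat) : Int) := by push_cast; ring
  rw [h1, PySem.List.pyGetD_natCast, PySem.List.pyGetD_natCast]
  simp [List.getD]

-- an index loop over the common prefix of three lists is a fold over their zip
theorem fold_pyRange_zip {β : Type} (f : β → Int → Int → Int → β) :
    ∀ (yp yt ti : List Int) (d : β),
      (PySem.List.pyRange 0 ((yp.zip (yt.zip ti)).length : Int) 1).foldl
        (fun d i => f d (PySem.List.pyGetD yp i 0) (PySem.List.pyGetD yt i 0)
          (PySem.List.pyGetD ti i 0)) d
      = (yp.zip (yt.zip ti)).foldl (fun d z => f d z.1 z.2.1 z.2.2) d := by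
  intro yp
  induction yp with
  | nil => intro yt ti d; simp [PySem.List.pyRange_one_eq_nil]
  | cons a yp ih =>
    intro yt ti d
    cases yt with
    | nil => simp [PySem.List.pyRange_one_eq_nil]
    | cons b yt =>
      cases ti with
      | nil => simp [PySem.List.pyRange_one_eq_nil]
      | cons c ti =>
        rw [List.zip_cons_cons, List.zip_cons_cons]
        simp only [List.length_cons, List.foldl_cons]
        set n := (yp.zip (yt.zip ti)).length with hn
        have hpos : (0 : Int) < ((n + 1 : Nat) : Int) := by exact_mod_cast Nat.succ_pos n
        rw [PySem.List.pyRange_one_cons hpos, List.foldl_cons]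
        have hstep : f d (PySem.List.pyGetD (a :: yp) 0 0) (PySem.List.pyGetD (b :: yt) 0 0)
            (PySem.List.pyGetD (c :: ti) 0 0) = f d a b c := by
          simp [PySem.List.pyGetD_zero_cons]
        rw [hstep]
        have hsh : PySem.List.pyRange (0 + 1) ((n + 1 : Nat) : Int) 1
            = (PySem.List.pyRange 0 (n : Int) 1).map (fun x => x + 1) := by
          rw [PySem.List.pyRange_one, PySem.List.pyRange_one, List.map_map]
          have : (((n + 1 : Nat) : Int) - (0 + 1)).toNat = ((n : Int) - 0).toNat := by
            push_cast; omega
          rw [this]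
          refine List.map_congr_left ?_
          intro k _; simp; ring
        rw [hsh, List.foldl_map]
        have hmid : List.foldl
            (fun x y => f x (PySem.List.pyGetD (a :: yp) (y + 1) 0)
              (PySem.List.pyGetD (b :: yt) (y + 1) 0) (PySem.List.pyGetD (c :: ti) (y + 1) 0))
            (f d a b c) (PySem.List.pyRange 0 (n : Int) 1)
            = List.foldl (fun d i => f d (PySem.List.pyGetD yp i 0)
              (PySem.List.pyGetD yt i 0) (PySem.List.pyGetD ti i 0))
            (f d a b c) (PySem.List.pyRange 0 (n : Int) 1) := by
          apply PySem.List.foldl_congr_mem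
          intro acc x hx
          have hx' := (PySem.List.mem_pyRange_one).1 hx
          rw [pyGetD_cons_succ _ _ _ _ hx'.1, pyGetD_cons_succ _ _ _ _ hx'.1,
            pyGetD_cons_succ _ _ _ _ hx'.1]
        rw [hmid]
        exact ih yt ti (f d a b c)

-- the conditional append-to-bucket loop is the plain group-by fold over selz
theorem fold_if_selz (rs : List String) :
    ∀ (zs : List (Int × Int × Int)) (d : PySem.Dict Int (List (String × Int))),
      zs.foldl (fun d z =>
        if z.1 ≠ z.2.1 then
          d.modify z.2.1 [] (fun l => l ++ [(PySem.List.pyGetD rs z.2.2 "", z.1)])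
        else d) d
      = (selz rs zs).foldl (fun d p => d.modify p.1 [] (fun l => l ++ [p.2])) d := by
  intro zs
  induction zs with
  | nil => intro d; simp [selz]
  | cons z zs ih =>
    intro d
    by_cases h : z.1 = z.2.1
    · simp [selz, h] at ih ⊢
      exact ih d
    · simp [selz, h] at ih ⊢
      exact ih _

-- B's bucket for a label is the projection of selz at that label
theorem filterMap_eq_selz (rs : List String) (c : Int) :
    ∀ zs : List (Int × Int × Int),
      zs.filterMap (fun z =>
        if z.2.1 = c ∧ z.1 ≠ z.2.1 then
          some (PySem.List.pyGetD rs z.2.2 "", z.1)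
        else none)
      = ((selz rs zs).filter (fun p => p.1 == c)).map (·.2) := by
  intro zs
  induction zs with
  | nil => simp [selz]
  | cons z zs ih =>
    obtain ⟨p, t, x⟩ := z
    by_cases h1 : p = t
    · simp only [selz] at ih ⊢
      simp [h1, ih]
    · by_cases h2 : t = c
      · subst h2
        simp only [selz] at ih ⊢
        simp [h1, ih]
      · simp only [selz] at ih ⊢
        simp [h1, h2, ih]

theorem zip3_mem (yp yt ti : List Int) (z : Int × Int × Int)
    (hz : z ∈ yp.zip (yt.zip ti)) :
    ∃ j, j < yp.length ∧ j < yt.length ∧ j < ti.length ∧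
      z = (yp.getD j 0, yt.getD j 0, ti.getD j 0) := by
  obtain ⟨j, hj, rfl⟩ := List.mem_iff_getElem.1 hz
  simp [List.length_zip] at hj
  refine ⟨j, hj.1, hj.2.1, hj.2.2, ?_⟩
  simp [List.getElem_zip, hj.1, hj.2.1, hj.2.2]

theorem selz_keys_mem (y_pred y_test test_indices : List Int) (raw_sentences : List String)
    (hpre : Pre_compare_test_results_1 y_pred y_test test_indices raw_sentences) :
    ∀ p ∈ selz raw_sentences (y_pred.zip (y_test.zip test_indices)),
      p.1 ∈ ([0, 1, 2, 3] : List Int) := by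
  intro p hp
  simp only [selz, List.mem_map, List.mem_filter] at hp
  obtain ⟨z, ⟨hzmem, hzne⟩, rfl⟩ := hp
  obtain ⟨j, hj1, hj2, hj3, rfl⟩ := zip3_mem _ _ _ _ hzmem
  simp only [decide_eq_true_eq] at hzne
  exact (hpre.2 j hj1 hzne).2.1

-- items of the group-by fold from the literal four-key dict
theorem items_groupby (rs : List String) (zs : List (Int × Int × Int))
    (hsub : ∀ p ∈ selz rs zs, p.1 ∈ ([0, 1, 2, 3] : List Int)) :
    ((selz rs zs).foldl (fun d p => d.modify p.1 [] (fun l => l ++ [p.2]))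
      (PySem.Dict.ofList [(0, []), (1, []), (2, []), (3, [])])).items
    = [(0, ((selz rs zs).filter (fun p => p.1 == (0:Int))).map (·.2)),
       (1, ((selz rs zs).filter (fun p => p.1 == (1:Int))).map (·.2)),
       (2, ((selz rs zs).filter (fun p => p.1 == (2:Int))).map (·.2)),
       (3, ((selz rs zs).filter (fun p => p.1 == (3:Int))).map (·.2))] := by
  set d0 : PySem.Dict Int (List (String × Int)) := PySem.Dict.ofList [(0, []), (1, []), (2, []), (3, [])] with hd0
  set l := selz rs zs with hl
  have hkeys : (l.foldl (fun d p => d.modify p.1 [] (fun l => l ++ [p.2])) d0).keys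
      = PySem.Set.update d0.keys (l.map Prod.fst) := by
    exact PySem.Dict.keys_foldl_modify_key l Prod.fst [] (fun d p => fun s => s ++ [p.2]) d0
  have hd0keys : d0.keys = [0, 1, 2, 3] := by decide
  have hupd : PySem.Set.update ([0,1,2,3] : List Int) (l.map Prod.fst) = [0,1,2,3] := by
    rw [PySem.Set.update_eq_append_filter]
    have : (PySem.Set.ofList (l.map Prod.fst)).filter
        (fun y => !(PySem.Set.contains ([0,1,2,3] : List Int) y)) = [] := by
      rw [List.filter_eq_nil_iff]
      intro y hy
      have hy' : y ∈ l.map Prod.fst := (PySem.Set.mem_ofList _ _).1 hy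
      obtain ⟨p, hp, rfl⟩ := List.mem_map.1 hy'
      have := hsub p hp
      simp at this ⊢
      tauto
    rw [this, List.append_nil]
  have hnd : (l.foldl (fun d p => d.modify p.1 [] (fun l => l ++ [p.2])) d0).keys.Nodup := by
    refine PySem.Dict.nodup_keys_foldl_modify_key l Prod.fst [] (fun d p => fun s => s ++ [p.2]) d0 ?_
    rw [hd0keys]; decide
  have hitems := PySem.Dict.items_eq_map_keys
    (l.foldl (fun d p => d.modify p.1 [] (fun l => l ++ [p.2])) d0) hnd []
  rw [hitems, hkeys, hd0keys, hupd]
  have hget : ∀ c : Int, d0.getD c [] = [] →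
      (l.foldl (fun d p => d.modify p.1 [] (fun l => l ++ [p.2])) d0).getD c []
      = (l.filter (fun p => p.1 == c)).map (·.2) := by
    intro c hc
    rw [PySem.Dict.getD_foldl_modify_append, hc, List.nil_append]
  simp only [List.map_cons, List.map_nil]
  rw [hget 0 (by decide), hget 1 (by decide), hget 2 (by decide), hget 3 (by decide)]

-- ===== VERDICT (by name: the statement is the Claim_ definition above) =====
theorem compare_test_results_1_spec : Claim_equal_compare_test_results_1 := by
  intro yp yt ti rs _hdom hpre
  unfold Spec_compare_test_results_1 compare_test_results_1 compare_test_results_1_alt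
  set zs := yp.zip (yt.zip ti) with hzs
  set d0 : PySem.Dict Int (List (String × Int)) := PySem.Dict.ofList ([(0, []), (1, []), (2, []), (3, [])] : List (Int × List (String × Int))) with hd0
  have hzlen : zs.length ≤ yp.length := by
    rw [hzs]; simp [List.length_zip]
  have hsplit : PySem.List.pyRange 0 (yp.length : Int) 1
      = PySem.List.pyRange 0 (zs.length : Int) 1
        ++ PySem.List.pyRange (zs.length : Int) (yp.length : Int) 1 :=
    PySem.List.pyRange_one_append 0 (zs.length : Int) (yp.length : Int)
      (by exact_mod_cast Nat.zero_le _) (by exact_mod_cast hzlen)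
  rw [hsplit, List.foldl_append]
  -- beyond the zip length no index is misclassified (Pre_), so the tail of the loop is a no-op
  have hover : ∀ (d : PySem.Dict Int (List (String × Int))),
      (PySem.List.pyRange (zs.length : Int) (yp.length : Int) 1).foldl
        (fun errors i =>
          if PySem.List.pyGetD yp i 0 ≠ PySem.List.pyGetD yt i 0 then
            errors.modify (PySem.List.pyGetD yt i 0) []
              (fun l => l ++ [(PySem.List.pyGetD rs (PySem.List.pyGetD ti i 0) "",
                               PySem.List.pyGetD yp i 0)])
          else errors) d = d := by
    intro d
    have h1 : (PySem.List.pyRange (zs.length : Int) (yp.length : Int) 1).foldl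
        (fun errors i =>
          if PySem.List.pyGetD yp i 0 ≠ PySem.List.pyGetD yt i 0 then
            errors.modify (PySem.List.pyGetD yt i 0) []
              (fun l => l ++ [(PySem.List.pyGetD rs (PySem.List.pyGetD ti i 0) "",
                               PySem.List.pyGetD yp i 0)])
          else errors) d
        = (PySem.List.pyRange (zs.length : Int) (yp.length : Int) 1).foldl
            (fun acc _ => acc) d := by
      apply PySem.List.foldl_congr_mem
      intro acc x hx
      have hx' := (PySem.List.mem_pyRange_one).1 hx
      obtain ⟨k, rfl⟩ : ∃ k : Nat, x = (k : Int) :=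
        ⟨x.toNat, (Int.toNat_of_nonneg (le_trans (by exact_mod_cast Nat.zero_le _) hx'.1)).symm⟩
      have hk1 : zs.length ≤ k := by exact_mod_cast hx'.1
      have hk2 : k < yp.length := by exact_mod_cast hx'.2
      have hcond : ¬ (yp.getD k 0 ≠ yt.getD k 0) := by
        intro hne
        have hlt := (hpre.2 k hk2 hne).1
        have hmin : zs.length = min yp.length (min yt.length ti.length) := by
          rw [hzs]; simp [List.length_zip]
        rw [hmin] at hk1
        have hlen1 := hpre.1
        omega
      simp only [PySem.List.pyGetD_natCast]
      rw [if_neg hcond]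
    rw [h1, PySem.List.foldl_ignore]
  rw [hover]
  -- the prefix loop is a fold over the zipped triples, then a group-by fold over selz
  have hfold := fold_pyRange_zip
    (fun d p t x => if p ≠ t then
        d.modify t [] (fun l => l ++ [(PySem.List.pyGetD rs x "", p)])
      else d) yp yt ti d0
  simp only [← hzs] at hfold
  rw [hfold, fold_if_selz rs zs d0, items_groupby rs zs (selz_keys_mem yp yt ti rs hpre)]
  have hr4 : List.range 4 = [0, 1, 2, 3] := by decide
  rw [hr4]
  simp only [List.map_cons, List.map_nil, Nat.cast_ofNat, Nat.cast_zero, Nat.cast_one]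
  rw [filterMap_eq_selz rs 0 zs, filterMap_eq_selz rs 1 zs, filterMap_eq_selz rs 2 zs,
    filterMap_eq_selz rs 3 zs]
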